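-- pv_equiv track=rewrite | github.com/Sarita-16/PythonPractice | add_all_ele_that_appear_even_number_of_times_in_matrix.py | sumOfEvenOccurrence
-- ===== SOURCE A (Python) =====
-- def sumOfEvenOccurrence(matrix):
--     elementCount = {}
--     for row in matrix:
--         for ele in row:
--             if ele in elementCount:
--                 elementCount[ele] += 1
--             else:
--                 elementCount[ele] = 1
--
--     total_sum = 0
--     for ele, c in elementCount.items():
--         if c % 2 == 0:
--             total_sum += ele * c
--
--     return total_sum
-- ===== SOURCE B (Python) =====
-- def sumOfEvenOccurrence(matrix):
--     # Sort-then-group: flatten, sort, scan consecutive equal runs.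
--     flat = sorted(x for row in matrix for x in row)
--     total = 0
--     i = 0
--     n = len(flat)
--     while i < n:
--         j = i + 1
--         while j < n and flat[j] == flat[i]:
--             j += 1
--         c = j - i
--         if c % 2 == 0:
--             total += flat[i] * c
--         i = j
--     return total
-- ===== Notes on version B (the rewrite author's own statement) =====
-- stated objective: alternative
-- what changed: B replaces A's dict-counting (hash map of element counts, then a pass over the items) by flatten + sort + a single scan over consecutive equal runs, adding value*runlength for even-length runs.
import Mathlib
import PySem

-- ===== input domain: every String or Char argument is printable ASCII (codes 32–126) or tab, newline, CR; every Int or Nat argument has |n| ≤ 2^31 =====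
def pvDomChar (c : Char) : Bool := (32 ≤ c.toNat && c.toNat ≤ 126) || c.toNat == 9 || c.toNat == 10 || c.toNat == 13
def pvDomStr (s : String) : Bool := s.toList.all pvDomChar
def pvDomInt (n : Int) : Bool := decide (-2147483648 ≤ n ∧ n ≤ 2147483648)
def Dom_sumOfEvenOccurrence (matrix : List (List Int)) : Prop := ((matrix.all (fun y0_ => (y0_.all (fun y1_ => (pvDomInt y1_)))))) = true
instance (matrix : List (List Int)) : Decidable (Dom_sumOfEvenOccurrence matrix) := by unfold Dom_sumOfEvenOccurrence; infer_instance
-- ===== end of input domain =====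

-- ===== PORT A =====
-- B changes the algorithm (sort + run scan instead of a dict of counts); equivalence of the return values is proved.
-- A-side helper: the loop body 'if ele in elementCount: elementCount[ele] += 1 else: elementCount[ele] = 1'
def pvCountStep (d : PySem.Dict Int Int) (e : Int) : PySem.Dict Int Int :=
  if d.contains e then d.modify e 0 (· + 1) else d.insert e 1

def sumOfEvenOccurrence (matrix : List (List Int)) : Int :=
  (matrix.foldl (fun d row => row.foldl pvCountStep d) PySem.Dict.empty).items.foldl (fun s p => if PySem.Int.mod p.2 2 = 0 then s + p.1 * p.2 else s) 0

-- ===== PORT B =====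
-- B-side helper: the outer while loop; takeWhile/dropWhile transcribe the inner run-counting while loop
def pvRunScan (total : Int) : List Int → Int
  | [] => total
  | x :: rest =>
      let c : Int := 1 + ((rest.takeWhile (· == x)).length : Int)
      pvRunScan (if PySem.Int.mod c 2 = 0 then total + x * c else total) (rest.dropWhile (· == x))
  termination_by ys => ys.length
  decreasing_by
    simpa using Nat.lt_succ_of_le (List.length_dropWhile_le _ _)

def sumOfEvenOccurrence_alt (matrix : List (List Int)) : Int :=
  pvRunScan 0 (PySem.List.sorted matrix.flatten (fun x => x) false)

-- ===== PRECONDITION & SPEC =====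
def Spec_sumOfEvenOccurrence (matrix : List (List Int)) (out : Int) : Prop := out = sumOfEvenOccurrence_alt matrix
instance (matrix : List (List Int)) (out : Int) : Decidable (Spec_sumOfEvenOccurrence matrix out) := by unfold Spec_sumOfEvenOccurrence; infer_instance

-- ===== CLAIM (what is proved, stated in full; the proofs are below) =====
def Claim_equal_sumOfEvenOccurrence : Prop := ∀ (matrix : List (List Int)), Dom_sumOfEvenOccurrence matrix → Spec_sumOfEvenOccurrence matrix (sumOfEvenOccurrence matrix)

-- ===== LEMMAS AND PROOFS =====

-- contribution of one distinct value k of the multiset l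
def pvF (l : List Int) (k : Int) : Int :=
  if PySem.Int.mod (l.count k : Int) 2 = 0 then k * (l.count k : Int) else 0

theorem pv_sum_congr {l₁ l₂ : List Int} (f : Int → Int) (h₁ : l₁.Nodup) (h₂ : l₂.Nodup)
    (hm : ∀ a, a ∈ l₁ ↔ a ∈ l₂) : (l₁.map f).sum = (l₂.map f).sum :=
  (((List.perm_ext_iff_of_nodup h₁ h₂).mpr hm).map f).sum_eq

theorem pvCountStep_eq : pvCountStep = fun d e => d.modify e 0 (· + 1) := by
  funext d e
  unfold pvCountStep
  by_cases h : d.contains e = true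
  · simp [h]
  · simp only [Bool.not_eq_true] at h
    simp only [h, Bool.false_eq_true, if_false, PySem.Dict.modify]
    rw [PySem.Dict.getD_of_not_contains]
    · norm_num
    · exact h

theorem pvA_eq (matrix : List (List Int)) :
    sumOfEvenOccurrence matrix
      = ((PySem.Set.ofList matrix.flatten).map (pvF matrix.flatten)).sum := by
  unfold sumOfEvenOccurrence
  rw [pvCountStep_eq, ← List.foldl_flatten, ← PySem.Dict.counter_eq_foldl,
      PySem.Dict.items_counter]
  have hstep : (fun (s : Int) (p : Int × Int) => if PySem.Int.mod p.2 2 = 0 then s + p.1 * p.2 else s)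
      = fun s p => s + (if PySem.Int.mod p.2 2 = 0 then p.1 * p.2 else 0) := by
    funext s p; split <;> simp
  rw [hstep, PySem.List.foldl_add, List.map_map, zero_add]
  rfl

-- structure of a sorted list at its head: the takeWhile-run is all x, and x does not occur later
theorem pv_split (x : Int) (rest : List Int) (hs : (x :: rest).Pairwise (· ≤ ·)) :
    (∀ z ∈ rest.takeWhile (· == x), z = x) ∧ x ∉ rest.dropWhile (· == x) := by
  constructor
  · intro z hz
    have hp : (z == x) = true := List.mem_takeWhile_imp (p := (· == x)) hz
    exact eq_of_beq hp
  · intro hx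
    cases hdc : rest.dropWhile (· == x) with
    | nil => rw [hdc] at hx; exact absurd hx (List.not_mem_nil)
    | cons w d' =>
      have h0 : rest.dropWhile (· == x) ≠ [] := by simp [hdc]
      have hw := List.head_dropWhile_not (p := (· == x)) (l := rest) h0
      simp only [hdc, List.head_cons] at hw
      have hwx : w ≠ x := by simpa using hw
      have hsub : List.Sublist (rest.dropWhile (· == x)) rest := List.dropWhile_sublist _
      have hxle : ∀ z ∈ rest, x ≤ z := (List.pairwise_cons.mp hs).1
      have hwrest : w ∈ rest := hsub.subset (by rw [hdc]; exact List.mem_cons_self)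
      have hxw : x < w := lt_of_le_of_ne (hxle w hwrest) (Ne.symm hwx)
      have hdp : (rest.dropWhile (· == x)).Pairwise (· ≤ ·) :=
        List.Pairwise.sublist hsub (List.pairwise_cons.mp hs).2
      rw [hdc] at hx hdp
      rcases List.mem_cons.mp hx with h | h
      · omega
      · have hle := (List.pairwise_cons.mp hdp).1 x h
        omega

-- the sum over distinct values of a sorted list, peeled at the head run
theorem pv_peel (x : Int) (rest : List Int) (hs : (x :: rest).Pairwise (· ≤ ·)) :
    ((PySem.Set.ofList (x :: rest)).map (pvF (x :: rest))).sum
      = pvF (x :: rest) x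
        + ((PySem.Set.ofList (rest.dropWhile (· == x))).map
            (pvF (rest.dropWhile (· == x)))).sum := by
  obtain ⟨ht, hxd⟩ := pv_split x rest hs
  have hrest : rest.takeWhile (· == x) ++ rest.dropWhile (· == x) = rest :=
    List.takeWhile_append_dropWhile
  have hmem : ∀ a : Int, a ∈ PySem.Set.ofList (x :: rest)
      ↔ a ∈ x :: PySem.Set.ofList (rest.dropWhile (· == x)) := by
    intro a
    simp only [PySem.Set.mem_ofList, List.mem_cons]
    constructor
    · rintro (h | h)
      · exact Or.inl h
      · have h' : a ∈ rest.takeWhile (· == x) ++ rest.dropWhile (· == x) := by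
          rw [hrest]; exact h
        rcases List.mem_append.mp h' with h'' | h''
        · exact Or.inl (ht a h'')
        · exact Or.inr h''
    · rintro (h | h)
      · exact Or.inl h
      · refine Or.inr ?_
        rw [← hrest]
        exact List.mem_append_right _ h
  have hnd : (x :: PySem.Set.ofList (rest.dropWhile (· == x))).Nodup :=
    List.nodup_cons.mpr
      ⟨fun h => hxd ((PySem.Set.mem_ofList _ _).mp h), PySem.Set.nodup_ofList _⟩
  rw [pv_sum_congr (pvF (x :: rest)) (PySem.Set.nodup_ofList _) hnd hmem, List.map_cons,
      List.sum_cons]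
  congr 1
  apply congrArg
  apply List.map_congr_left
  intro k hk
  have hkd : k ∈ rest.dropWhile (· == x) := (PySem.Set.mem_ofList _ _).mp hk
  have hkx : k ≠ x := fun he => hxd (he ▸ hkd)
  have hcnt : (x :: rest).count k = (rest.dropWhile (· == x)).count k := by
    have h1 : (x :: rest).count k = rest.count k := by
      rw [List.count_cons]; simp [Ne.symm hkx]
    have h2 : rest.count k
        = (rest.takeWhile (· == x)).count k + (rest.dropWhile (· == x)).count k := by
      conv_lhs => rw [← hrest]
      exact List.count_append ..
    have h3 : (rest.takeWhile (· == x)).count k = 0 :=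
      List.count_eq_zero.mpr (fun hkt => hkx (ht k hkt))
    omega
  unfold pvF
  rw [hcnt]

theorem pvRunScan_eq (total : Int) (ys : List Int) (hs : ys.Pairwise (· ≤ ·)) :
    pvRunScan total ys = total + ((PySem.Set.ofList ys).map (pvF ys)).sum := by
  induction total, ys using pvRunScan.induct with
  | case1 total => simp [pvRunScan]
  | case2 total x rest a ih =>
    obtain ⟨ht, hxd⟩ := pv_split x rest hs
    have hrest : rest.takeWhile (· == x) ++ rest.dropWhile (· == x) = rest :=
      List.takeWhile_append_dropWhile
    have hdp : (rest.dropWhile (· == x)).Pairwise (· ≤ ·) :=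
      List.Pairwise.sublist (List.dropWhile_sublist _) (List.pairwise_cons.mp hs).2
    have ha : a = 1 + ((rest.takeWhile (· == x)).length : Int) := rfl
    have hcx : (((x :: rest).count x : Nat) : Int) = a := by
      have h1 : (rest.takeWhile (· == x)).count x = (rest.takeWhile (· == x)).length :=
        List.count_eq_length.mpr (fun b hb => (ht b hb).symm)
      have h2 : (rest.dropWhile (· == x)).count x = 0 := List.count_eq_zero.mpr hxd
      have h3 : rest.count x
          = (rest.takeWhile (· == x)).count x + (rest.dropWhile (· == x)).count x := by
        conv_lhs => rw [← hrest]
        exact List.count_append ..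
      have hn : (x :: rest).count x = (rest.takeWhile (· == x)).length + 1 := by
        rw [List.count_cons_self]
        omega
      rw [hn, ha]
      push_cast
      ring
    have hF : pvF (x :: rest) x = if PySem.Int.mod a 2 = 0 then x * a else 0 := by
      unfold pvF
      rw [hcx]
    have ih' := ih hdp
    simp only [dite_eq_ite] at ih'
    rw [pvRunScan, ← ha, ih', pv_peel x rest hs, hF]
    split_ifs <;> ring

-- ===== VERDICT (by name: the statement is the Claim_ definition above) =====
theorem sumOfEvenOccurrence_spec : Claim_equal_sumOfEvenOccurrence := by
  intro matrix _
  unfold Spec_sumOfEvenOccurrence sumOfEvenOccurrence_alt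
  rw [pvA_eq, pvRunScan_eq 0 _ (by simpa using PySem.List.sorted_pairwise matrix.flatten (fun x => x))]
  have hperm := PySem.List.sorted_perm matrix.flatten (fun x => x) false
  have hF : pvF (PySem.List.sorted matrix.flatten (fun x => x) false) = pvF matrix.flatten := by
    funext k; unfold pvF; rw [hperm.count_eq]
  rw [hF, zero_add]
  exact pv_sum_congr _ (PySem.Set.nodup_ofList _) (PySem.Set.nodup_ofList _)
    (fun a => by simp [PySem.Set.mem_ofList, hperm.mem_iff])
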